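-- pv_equiv track=rewrite | github.com/ret-hub123/Backend_ways | praktic_code/task_on_horse.py | count_horses
-- ===== SOURCE A (Python) =====
-- def count_horses(sound_str):
--     s = sound_str
--     list_s = [word for word in s]
--     horse = []
--     fl = False
--
--
--     for i in range(1, len(list_s)):
--             while int(list_s[i - 1]) > 0:
--                 for j in range(i - 1, len(list_s), i):
--                     if int(list_s[j]) > 0:
--                         list_s[j] = str(int(list_s[j]) - 1)
--                         fl = True
--                 if fl == True:
--                     horse.append(i)
--
--     return horse
-- ===== SOURCE B (Python) =====
-- def count_horses(sound_str):
--     list_s = [word for word in sound_str]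
--     horse = []
--     for i in range(1, len(list_s)):
--         c = int(list_s[i - 1])
--         if c > 0:
--             for j in range(i - 1, len(list_s), i):
--                 list_s[j] = str(max(0, int(list_s[j]) - c))
--             horse.extend([i] * c)
--     return horse
-- ===== Notes on version B (the rewrite author's own statement) =====
-- stated objective: simpler
-- what changed: A's inner while loop repeatedly sweeps the arithmetic progression decrementing each positive cell by one and re-parsing the counter cell, with a vestigial flag guarding the append; B reads the counter once per round, does a single sweep applying the closed-form clamped subtraction max(0, v-c), and appends the c copies of i in one batch, so the while loop and the flag disappear.
import Mathlib
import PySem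

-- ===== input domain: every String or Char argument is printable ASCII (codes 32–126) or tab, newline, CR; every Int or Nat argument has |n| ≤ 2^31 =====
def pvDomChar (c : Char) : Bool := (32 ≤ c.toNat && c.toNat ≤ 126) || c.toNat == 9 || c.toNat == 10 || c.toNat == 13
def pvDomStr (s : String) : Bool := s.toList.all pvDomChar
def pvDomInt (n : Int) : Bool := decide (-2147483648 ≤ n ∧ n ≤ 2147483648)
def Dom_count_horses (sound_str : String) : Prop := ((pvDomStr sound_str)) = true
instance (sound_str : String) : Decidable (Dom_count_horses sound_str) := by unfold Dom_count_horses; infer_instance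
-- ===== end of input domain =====

-- B replaces A's repeated decrement-by-1 sweeps (the whole inner while loop) by ONE sweep doing a
-- closed-form clamped subtraction and a batch append; same return value on Pre_ (A mutates only its
-- local copy of the input, so there is no observable side effect to preserve).

-- ===== PORT A =====
-- one pass of A's inner `for j` loop plus the `if fl == True: horse.append(i)` that follows it;
-- state: (list_s, horse, fl).  `none` from ofStr? is where Python's int() raises (outside Pre_).
def countHorsesPass (n i : Int) (st : List String × List Int × Bool) : List String × List Int × Bool :=
  let r := (PySem.List.pyRange (i - 1) n i).foldl
    (fun (q : List String × Bool) j =>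
      match (PySem.List.pyGet? q.1 j).bind PySem.Int.ofStr? with
      | none => q
      | some v => if 0 < v then (q.1.set j.toNat (PySem.Int.toStr (v - 1)), true) else q)
    (st.1, st.2.2)
  (r.1, if r.2 = true then st.2.1 ++ [i] else st.2.1, r.2)

-- A's `while int(list_s[i-1]) > 0`.  The tested cell always holds a single decimal digit (≤ 9) and is
-- decremented on every pass, so fuel 10 only makes the recursion structural; it never cuts a run short.
def countHorsesWhile (n i : Int) : Nat → List String × List Int × Bool → List String × List Int × Bool
  | 0, st => st
  | Nat.succ fuel, st =>
    match (PySem.List.pyGet? st.1 (i - 1)).bind PySem.Int.ofStr? with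
    | none => st
    | some v => if 0 < v then countHorsesWhile n i fuel (countHorsesPass n i st) else st

def count_horses (sound_str : String) : List Int :=
  let list_s := sound_str.toList.map (fun ch => String.ofList [ch])
  let n : Int := (list_s.length : Int)
  ((PySem.List.pyRange 1 n 1).foldl (fun st i => countHorsesWhile n i 10 st)
    (list_s, ([], false))).2.1

-- ===== PORT B =====
def count_horses_alt (sound_str : String) : List Int :=
  let list_s := sound_str.toList.map (fun ch => String.ofList [ch])
  let n : Int := (list_s.length : Int)
  ((PySem.List.pyRange 1 n 1).foldl
    (fun (st : List String × List Int) i =>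
      match (PySem.List.pyGet? st.1 (i - 1)).bind PySem.Int.ofStr? with
      | none => st
      | some c =>
        if 0 < c then
          ((PySem.List.pyRange (i - 1) n i).foldl
            (fun L j =>
              match (PySem.List.pyGet? L j).bind PySem.Int.ofStr? with
              | none => L
              | some v => L.set j.toNat (PySem.Int.toStr (max 0 (v - c))))
            st.1,
           st.2 ++ List.replicate c.toNat i)
        else st)
    (list_s, [])).2

-- ===== PRECONDITION & SPEC =====
-- Exactly the inputs on which the Python A returns (elsewhere int() raises ValueError): every
-- character before the last must be a digit, and the last must be a digit too unless the character
-- at position k-1 is the zero digit for every proper divisor k of the length (then no sweep with a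
-- positive counter ever reaches the last position, so it is never parsed).
def Pre_count_horses (sound_str : String) : Prop :=
  sound_str.toList.length ≤ 1 ∨
    ((∀ p, p < sound_str.toList.length - 1 → (sound_str.toList[p]!).isDigit = true) ∧
     ((sound_str.toList[sound_str.toList.length - 1]!).isDigit = true ∨
      ∀ k, 1 ≤ k → k < sound_str.toList.length → k ∣ sound_str.toList.length →
        sound_str.toList[k - 1]! = '0'))
instance (sound_str : String) : Decidable (Pre_count_horses sound_str) := by
  unfold Pre_count_horses; infer_instance

def pvWitness_count_horses : String := "2103"

def Spec_count_horses (sound_str : String) (out : List Int) : Prop := out = count_horses_alt sound_str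
instance (sound_str : String) (out : List Int) : Decidable (Spec_count_horses sound_str out) := by
  unfold Spec_count_horses; infer_instance

-- ===== CLAIM (what is proved, stated in full; the proofs are below) =====
def Claim_equal_count_horses : Prop := ∀ (sound_str : String), Dom_count_horses sound_str → Pre_count_horses sound_str → Spec_count_horses sound_str (count_horses sound_str)

-- ===== LEMMAS AND PROOFS =====

-- "cell p holds the canonical single-digit string of some value v ∈ [0,9]"
def pvCanonAt (L : List String) (p : Nat) : Prop :=
  ∃ v : Int, 0 ≤ v ∧ v ≤ 9 ∧ L[p]? = some (PySem.Int.toStr v)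

-- all cells visited by round i (indices j with i ∣ j+1) are canonical digits
def pvCanonJ (n i : Int) (L : List String) : Prop :=
  ∀ j ∈ PySem.List.pyRange (i - 1) n i, pvCanonAt L j.toNat

-- generic single-cell update step shared by the pointwise analysis of both inner loops
def pvStepF (f : Int → Int) (L : List String) (j : Int) : List String :=
  match (PySem.List.pyGet? L j).bind PySem.Int.ofStr? with
  | none => L
  | some v => L.set j.toNat (PySem.Int.toStr (f v))

-- pointwise description of one sweep of round i applying f to every parsed visited cell
def pvMap (i : Int) (f : Int → Int) (L : List String) : List String :=
  L.mapIdx (fun p w =>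
    if i ∣ ((p : Int) + 1) then
      match PySem.Int.ofStr? w with
      | none => w
      | some v => PySem.Int.toStr (f v)
    else w)

-- outer-loop invariant (n = original length): all cells but possibly the last are canonical digits,
-- and the last is one too unless the cells before all proper divisors of n are pegged at 0
def pvGI (n : Nat) (L : List String) : Prop :=
  L.length = n ∧ (∀ p, p + 1 < n → pvCanonAt L p) ∧
  (pvCanonAt L (n - 1) ∨
   ∀ k : Nat, 1 ≤ k → k < n → k ∣ n → L[k - 1]? = some (PySem.Int.toStr 0))

-- A's inner `for` loop step, named for the proofs
def pvAStep (q : List String × Bool) (j : Int) : List String × Bool :=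
  match (PySem.List.pyGet? q.1 j).bind PySem.Int.ofStr? with
  | none => q
  | some v => if 0 < v then (q.1.set j.toNat (PySem.Int.toStr (v - 1)), true) else q

-- B's round step, named for the proofs (its inner fold function is definitionally pvStepF)
def pvBStep (n : Int) (st : List String × List Int) (i : Int) : List String × List Int :=
  match (PySem.List.pyGet? st.1 (i - 1)).bind PySem.Int.ofStr? with
  | none => st
  | some c =>
    if 0 < c then
      ((PySem.List.pyRange (i - 1) n i).foldl (pvStepF (fun v => max 0 (v - c))) st.1,
       st.2 ++ List.replicate c.toNat i)
    else st

lemma pvCharEq (a b : Char) (h : a.toNat = b.toNat) : a = b :=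
  Char.ext (UInt32.toNat_inj.mp h)

lemma pvRound (v : Int) (h0 : 0 ≤ v) (h9 : v ≤ 9) :
    PySem.Int.ofStr? (PySem.Int.toStr v) = some v := by
  interval_cases v <;> decide

lemma pvDigit (c : Char) (h : c.isDigit = true) :
    ∃ v : Int, 0 ≤ v ∧ v ≤ 9 ∧ String.ofList [c] = PySem.Int.toStr v := by
  have h48 : 48 ≤ c.toNat ∧ c.toNat ≤ 57 := by
    simp [Char.isDigit] at h
    exact ⟨h.1, h.2⟩
  have hor : c.toNat = 48 ∨ c.toNat = 49 ∨ c.toNat = 50 ∨ c.toNat = 51 ∨ c.toNat = 52 ∨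
      c.toNat = 53 ∨ c.toNat = 54 ∨ c.toNat = 55 ∨ c.toNat = 56 ∨ c.toNat = 57 := by omega
  rcases hor with h|h|h|h|h|h|h|h|h|h
  · exact ⟨0, by norm_num, by norm_num, by rw [pvCharEq c '0' (by rw [h]; rfl)]; rfl⟩
  · exact ⟨1, by norm_num, by norm_num, by rw [pvCharEq c '1' (by rw [h]; rfl)]; rfl⟩
  · exact ⟨2, by norm_num, by norm_num, by rw [pvCharEq c '2' (by rw [h]; rfl)]; rfl⟩
  · exact ⟨3, by norm_num, by norm_num, by rw [pvCharEq c '3' (by rw [h]; rfl)]; rfl⟩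
  · exact ⟨4, by norm_num, by norm_num, by rw [pvCharEq c '4' (by rw [h]; rfl)]; rfl⟩
  · exact ⟨5, by norm_num, by norm_num, by rw [pvCharEq c '5' (by rw [h]; rfl)]; rfl⟩
  · exact ⟨6, by norm_num, by norm_num, by rw [pvCharEq c '6' (by rw [h]; rfl)]; rfl⟩
  · exact ⟨7, by norm_num, by norm_num, by rw [pvCharEq c '7' (by rw [h]; rfl)]; rfl⟩
  · exact ⟨8, by norm_num, by norm_num, by rw [pvCharEq c '8' (by rw [h]; rfl)]; rfl⟩
  · exact ⟨9, by norm_num, by norm_num, by rw [pvCharEq c '9' (by rw [h]; rfl)]; rfl⟩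

lemma pvGet_nonneg (L : List String) (j : Int) (h : 0 ≤ j) :
    PySem.List.pyGet? L j = L[j.toNat]? := by
  simp only [PySem.List.pyGet?, PySem.List.pyIdx?, if_pos h]
  split
  · simp
  · rename_i hlt
    rw [List.getElem?_eq_none]
    · simp
    · omega

lemma pvStepF_get_ne (f : Int → Int) (L : List String) (j : Int) (p : Nat) (hne : p ≠ j.toNat) :
    (pvStepF f L j)[p]? = L[p]? := by
  unfold pvStepF
  cases (PySem.List.pyGet? L j).bind PySem.Int.ofStr? with
  | none => rfl
  | some v => exact List.getElem?_set_ne (by omega)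

lemma pvStepF_length (f : Int → Int) (L : List String) (j : Int) :
    (pvStepF f L j).length = L.length := by
  unfold pvStepF; cases (PySem.List.pyGet? L j).bind PySem.Int.ofStr? <;> simp

lemma pvFoldStepF_getElem? (f : Int → Int) (J : List Int) (L : List String) (p : Nat)
    (hd : J.Pairwise (· ≠ ·)) (hb : ∀ j ∈ J, 0 ≤ j ∧ j.toNat < L.length) :
    (J.foldl (pvStepF f) L)[p]? =
      if (p : Int) ∈ J then
        match L[p]?.bind PySem.Int.ofStr? with
        | none => L[p]?
        | some v => some (PySem.Int.toStr (f v))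
      else L[p]? := by
  induction J generalizing L with
  | nil => simp
  | cons j T ih =>
    obtain ⟨hj0, hjlt⟩ := hb j (List.mem_cons_self)
    have hlen : (pvStepF f L j).length = L.length := pvStepF_length f L j
    have htail := ih (pvStepF f L j) (List.Pairwise.sublist (List.sublist_cons_self j T) hd)
      (fun t ht => by obtain ⟨h1, h2⟩ := hb t (List.mem_cons_of_mem j ht); exact ⟨h1, by omega⟩)
    rw [List.foldl_cons, htail]
    by_cases hpT : (p : Int) ∈ T
    · have hpj : (p : Int) ≠ j := by
        intro hEq; exact (List.rel_of_pairwise_cons hd (hEq ▸ hpT)) rfl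
      have : p ≠ j.toNat := by omega
      rw [if_pos hpT, if_pos (List.mem_cons_of_mem j hpT), pvStepF_get_ne f L j p this]
    · by_cases hpj : (p : Int) = j
      · have hp' : p = j.toNat := by omega
        rw [if_neg hpT, if_pos (by simp [hpj])]
        subst hp'
        unfold pvStepF
        rw [pvGet_nonneg L j hj0]
        cases hLp : L[j.toNat]? with
        | none => simp [hLp]
        | some w =>
          cases hw : PySem.Int.ofStr? w with
          | none => simp [hLp, hw]
          | some v => simp [hw, List.getElem?_set_self (by omega)]
      · have : p ≠ j.toNat := by omega
        rw [if_neg hpT, if_neg (by simp [hpj, hpT]), pvStepF_get_ne f L j p this]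

lemma pvRange_pairwise (a b s : Int) (hs : 0 < s) :
    (PySem.List.pyRange a b s).Pairwise (· ≠ ·) := by
  rw [PySem.List.pyRange_of_pos a b hs]
  refine List.Pairwise.map _ ?_ (List.pairwise_lt_range)
  intro x y hxy
  have : (x : Int) < (y : Int) := by exact_mod_cast hxy
  intro hEq
  have : s * (x:Int) = s * (y:Int) := by omega
  have := mul_left_cancel₀ (by omega : s ≠ 0) this
  omega

lemma pvRange_bounds (a b s : Int) (hs : 0 < s) (ha : 0 ≤ a) :
    ∀ j ∈ PySem.List.pyRange a b s, 0 ≤ j ∧ j < b := by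
  intro j hj
  obtain ⟨h1, h2, _⟩ := (PySem.List.mem_pyRange_iff_of_pos hs j).mp hj
  exact ⟨by omega, h2⟩

lemma pvMem_round (i n : Int) (hi : 1 ≤ i) (p : Nat) :
    ((p : Int) ∈ PySem.List.pyRange (i - 1) n i) ↔ ((p : Int) < n ∧ i ∣ (p : Int) + 1) := by
  rw [PySem.List.mem_pyRange_iff_of_pos (by omega)]
  constructor
  · rintro ⟨h1, h2, k, hk⟩
    exact ⟨h2, k + 1, by rw [mul_add, mul_one]; omega⟩
  · rintro ⟨h1, hdvd⟩
    have hle := Int.le_of_dvd (by omega) hdvd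
    obtain ⟨k, hk⟩ := hdvd
    exact ⟨by omega, h1, k - 1, by rw [mul_sub, mul_one]; omega⟩

lemma pvMap_length (i : Int) (f : Int → Int) (L : List String) :
    (pvMap i f L).length = L.length := by
  unfold pvMap; exact List.length_mapIdx

-- a fold of pvStepF over round i's index range IS the pointwise map pvMap
lemma pvInnerF_eq (n i : Int) (f : Int → Int) (hi : 1 ≤ i) (L : List String)
    (hL : (L.length : Int) = n) :
    (PySem.List.pyRange (i - 1) n i).foldl (pvStepF f) L = pvMap i f L := by
  apply List.ext_getElem?
  intro p
  rw [pvFoldStepF_getElem? f _ L p (pvRange_pairwise _ _ _ (by omega))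
      (fun j hj => by
        obtain ⟨h1, h2⟩ := pvRange_bounds (i-1) n i (by omega) (by omega) j hj
        exact ⟨h1, by omega⟩)]
  unfold pvMap
  rw [List.getElem?_mapIdx]
  by_cases hp : p < L.length
  · have hw : L[p]? = some L[p] := List.getElem?_eq_getElem hp
    rw [hw]
    by_cases hdvd : i ∣ (p : Int) + 1
    · rw [if_pos ((pvMem_round i n hi p).mpr ⟨by omega, hdvd⟩)]
      cases hv : PySem.Int.ofStr? L[p] with
      | none => simp [hv, if_pos hdvd]
      | some v => simp [hv, if_pos hdvd]
    · rw [if_neg (fun hmem => hdvd ((pvMem_round i n hi p).mp hmem).2)]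
      simp [if_neg hdvd]
  · have hnone : L[p]? = none := List.getElem?_eq_none (by omega)
    rw [if_neg, hnone]
    · rfl
    · intro hmem
      obtain ⟨h1, h2⟩ := pvRange_bounds (i-1) n i (by omega) (by omega) _ hmem
      omega

lemma pvSetSelf (l : List String) (n : Nat) (a : String) (h : l[n]? = some a) :
    l.set n a = l := by
  apply List.ext_getElem?
  intro p
  by_cases hp : p = n
  · subst hp
    rw [List.getElem?_set_self (List.getElem?_eq_some_iff.mp h).1, h]
  · exact List.getElem?_set_ne (by omega)

-- A's pass, list component: it is a pvStepF fold with f = max 0 (· - 1)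
lemma pvPassA_fst (J : List Int) :
    ∀ (L : List String) (fl : Bool),
      J.Pairwise (· ≠ ·) → (∀ j ∈ J, 0 ≤ j ∧ j.toNat < L.length) →
      (∀ j ∈ J, pvCanonAt L j.toNat) →
      (J.foldl pvAStep (L, fl)).1 = J.foldl (pvStepF (fun v => max 0 (v - 1))) L := by
  induction J with
  | nil => intro L fl _ _ _; rfl
  | cons j T ih =>
    intro L fl hd hb hc
    obtain ⟨hj0, hjlt⟩ := hb j (List.mem_cons_self)
    obtain ⟨v, hv0, hv9, hvL⟩ := hc j (List.mem_cons_self)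
    have hparse : (PySem.List.pyGet? L j).bind PySem.Int.ofStr? = some v := by
      rw [pvGet_nonneg L j hj0, hvL]
      simp [pvRound v hv0 hv9]
    have hdT : T.Pairwise (· ≠ ·) := List.Pairwise.sublist (List.sublist_cons_self j T) hd
    have hne : ∀ t ∈ T, t.toNat ≠ j.toNat := by
      intro t ht
      have h1 := (List.rel_of_pairwise_cons hd ht)
      obtain ⟨ht0, _⟩ := hb t (List.mem_cons_of_mem j ht)
      omega
    rw [List.foldl_cons, List.foldl_cons]
    by_cases hpos : 0 < v
    · have hmax : max 0 (v - 1) = v - 1 := by omega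
      have hstepA : pvAStep (L, fl) j = (L.set j.toNat (PySem.Int.toStr (v - 1)), true) := by
        unfold pvAStep; rw [hparse]; simp [hpos]
      have hstepF : pvStepF (fun v => max 0 (v - 1)) L j
          = L.set j.toNat (PySem.Int.toStr (v - 1)) := by
        unfold pvStepF; rw [hparse]
        show L.set j.toNat (PySem.Int.toStr (max 0 (v - 1))) = _
        rw [hmax]
      rw [hstepA, hstepF]
      apply ih _ true hdT
      · intro t ht
        obtain ⟨h1, h2⟩ := hb t (List.mem_cons_of_mem j ht)
        exact ⟨h1, by simpa using h2⟩
      · intro t ht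
        obtain ⟨w, hw0, hw9, hwL⟩ := hc t (List.mem_cons_of_mem j ht)
        exact ⟨w, hw0, hw9, by rw [List.getElem?_set_ne (by have := hne t ht; omega), hwL]⟩
    · have hv0' : v = 0 := by omega
      have hstepA : pvAStep (L, fl) j = (L, fl) := by
        unfold pvAStep; rw [hparse]; simp [hpos]
      have hstepF : pvStepF (fun v => max 0 (v - 1)) L j = L := by
        unfold pvStepF; rw [hparse]
        show L.set j.toNat (PySem.Int.toStr (max 0 (v - 1))) = L
        have hmax : max 0 (v - 1) = v := by omega
        rw [hmax]
        exact pvSetSelf L j.toNat _ hvL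
      rw [hstepA, hstepF]
      exact ih L fl hdT (fun t ht => hb t (List.mem_cons_of_mem j ht))
        (fun t ht => hc t (List.mem_cons_of_mem j ht))

-- A's pass, flag component: once true, stays true
lemma pvPassA_snd_mono (J : List Int) :
    ∀ (L : List String), (J.foldl pvAStep (L, true)).2 = true := by
  induction J with
  | nil => intro L; rfl
  | cons j T ih =>
    intro L
    rw [List.foldl_cons]
    unfold pvAStep
    cases (PySem.List.pyGet? L j).bind PySem.Int.ofStr? with
    | none => exact ih L
    | some v =>
      by_cases hpos : 0 < v
      · simp only [if_pos hpos]; exact ih _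
      · simp only [if_neg hpos]; exact ih L

-- A's pass, flag component: a positive visited cell forces the flag to true
lemma pvPassA_snd_pos (J : List Int) :
    ∀ (L : List String) (fl : Bool) (j0 : Int) (v0 : Int), j0 ∈ J → 0 < v0 →
      (PySem.List.pyGet? L j0).bind PySem.Int.ofStr? = some v0 →
      (J.foldl pvAStep (L, fl)).2 = true := by
  induction J with
  | nil => intro L fl j0 v0 h; simp at h
  | cons j T ih =>
    intro L fl j0 v0 hj0 hpos hv0
    rw [List.foldl_cons]
    by_cases hjj : j0 = j
    · subst hjj
      have hstep : pvAStep (L, fl) j0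
          = (L.set j0.toNat (PySem.Int.toStr (v0 - 1)), true) := by
        unfold pvAStep; rw [hv0]; simp [hpos]
      rw [hstep]
      exact pvPassA_snd_mono T _
    · have hT : j0 ∈ T := (List.mem_cons.mp hj0).resolve_left hjj
      show (T.foldl pvAStep (pvAStep (L, fl) j)).2 = true
      unfold pvAStep
      cases hp : (PySem.List.pyGet? L j).bind PySem.Int.ofStr? with
      | none => exact ih L fl j0 v0 hT hpos hv0
      | some v =>
        by_cases hvp : 0 < v
        · simp only [if_pos hvp]
          exact pvPassA_snd_mono T _
        · simp only [if_neg hvp]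
          exact ih L fl j0 v0 hT hpos hv0

-- composing a 1-sweep with a c-sweep is a (c+1)-sweep, on canonical cells
lemma pvMapComp (n i : Int) (hi : 1 ≤ i) (c : Int) (hc : 0 ≤ c) (L : List String)
    (hL : (L.length : Int) = n) (hcanon : pvCanonJ n i L) :
    pvMap i (fun v => max 0 (v - c)) (pvMap i (fun v => max 0 (v - 1)) L)
      = pvMap i (fun v => max 0 (v - (c + 1))) L := by
  apply List.ext_getElem?
  intro p
  unfold pvMap
  rw [List.getElem?_mapIdx, List.getElem?_mapIdx, List.getElem?_mapIdx]
  by_cases hp : p < L.length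
  · rw [List.getElem?_eq_getElem hp]
    by_cases hdvd : i ∣ (p : Int) + 1
    · obtain ⟨v, hv0, hv9, hvL⟩ := hcanon (p : Int)
        ((pvMem_round i n hi p).mpr ⟨by omega, hdvd⟩)
      have hvL' : L[p]? = some (PySem.Int.toStr v) := by simpa using hvL
      have hvp : L[p] = PySem.Int.toStr v := by
        rw [List.getElem?_eq_getElem hp] at hvL'
        exact Option.some_inj.mp hvL'
      simp only [hvp, if_pos hdvd, pvRound v hv0 hv9,
        pvRound (max 0 (v - 1)) (by omega) (by omega), Option.map_some]
      congr 2
      omega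
    · simp [if_neg hdvd]
  · rw [List.getElem?_eq_none (by omega)]
    rfl

-- the while loop unrolled: value c at cell i-1 gives c sweeps and c appended copies of i
lemma pvWhileA_eq (n i : Int) (hi : 1 ≤ i) (hin : i < n) :
    ∀ (cN fuel : Nat) (L : List String) (h : List Int) (fl : Bool),
      cN < fuel → cN ≤ 9 → (L.length : Int) = n → pvCanonJ n i L →
      L[(i - 1).toNat]? = some (PySem.Int.toStr (cN : Int)) →
      countHorsesWhile n i fuel (L, h, fl) =
        (if cN = 0 then L else pvMap i (fun v => max 0 (v - (cN : Int))) L,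
         h ++ List.replicate cN i,
         if cN = 0 then fl else true) := by
  intro cN
  induction cN with
  | zero =>
    intro fuel L h fl hfuel _ hL _ hval
    cases fuel with
    | zero => omega
    | succ f =>
      show (match (PySem.List.pyGet? L (i-1)).bind PySem.Int.ofStr? with
            | none => (L, h, fl)
            | some v => if 0 < v then countHorsesWhile n i f (countHorsesPass n i (L, h, fl))
                        else (L, h, fl)) = _
      have h00 := pvRound 0 (by norm_num) (by norm_num)
      rw [pvGet_nonneg L (i-1) (by omega), hval]
      norm_num [h00]
  | succ cN ih =>
    intro fuel L h fl hfuel hc9 hL hcanon hval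
    cases fuel with
    | zero => omega
    | succ f =>
      have hcastpos : (0 : Int) < ((cN + 1 : Nat) : Int) := by exact_mod_cast Nat.succ_pos cN
      have hr1 : PySem.Int.ofStr? (PySem.Int.toStr ((cN + 1 : Nat) : Int))
          = some ((cN + 1 : Nat) : Int) :=
        pvRound _ (by positivity) (by exact_mod_cast hc9)
      have hparse : (PySem.List.pyGet? L (i-1)).bind PySem.Int.ofStr?
          = some ((cN + 1 : Nat) : Int) := by
        rw [pvGet_nonneg L (i-1) (by omega), hval]
        exact hr1
      show (match (PySem.List.pyGet? L (i-1)).bind PySem.Int.ofStr? with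
            | none => (L, h, fl)
            | some v => if 0 < v then countHorsesWhile n i f (countHorsesPass n i (L, h, fl))
                        else (L, h, fl)) = _
      rw [hparse]
      simp only [if_pos hcastpos]
      -- evaluate the pass
      have hJb : ∀ j ∈ PySem.List.pyRange (i-1) n i, 0 ≤ j ∧ j.toNat < L.length := by
        intro j hj
        obtain ⟨h1, h2⟩ := pvRange_bounds (i-1) n i (by omega) (by omega) j hj
        exact ⟨h1, by omega⟩
      have hJd := pvRange_pairwise (i-1) n i (by omega)
      have hmem0 : (i - 1) ∈ PySem.List.pyRange (i-1) n i := by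
        rw [PySem.List.mem_pyRange_iff_of_pos (by omega)]
        exact ⟨le_refl _, by omega, ⟨0, by ring⟩⟩
      have hfst : ((PySem.List.pyRange (i-1) n i).foldl pvAStep (L, fl)).1
          = pvMap i (fun v => max 0 (v - 1)) L := by
        rw [pvPassA_fst _ L fl hJd hJb hcanon]
        exact pvInnerF_eq n i _ hi L hL
      have hsnd : ((PySem.List.pyRange (i-1) n i).foldl pvAStep (L, fl)).2 = true :=
        pvPassA_snd_pos _ L fl (i-1) _ hmem0 hcastpos hparse
      have hpass : countHorsesPass n i (L, h, fl)
          = (pvMap i (fun v => max 0 (v - 1)) L, h ++ [i], true) := by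
        show (((PySem.List.pyRange (i-1) n i).foldl pvAStep (L, fl)).1,
              if ((PySem.List.pyRange (i-1) n i).foldl pvAStep (L, fl)).2 = true
                then h ++ [i] else h,
              ((PySem.List.pyRange (i-1) n i).foldl pvAStep (L, fl)).2) = _
        rw [hfst, hsnd]
        simp
      rw [hpass]
      -- invariants for the next iteration
      set L1 := pvMap i (fun v => max 0 (v - 1)) L with hL1def
      have hL1 : (L1.length : Int) = n := by rw [hL1def, pvMap_length]; exact hL
      have hcanon1 : pvCanonJ n i L1 := by
        intro j hj
        obtain ⟨hj0, hjlt⟩ := hJb j hj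
        obtain ⟨v, hv0, hv9, hvL⟩ := hcanon j hj
        have hjj : ((j.toNat : Nat) : Int) = j := Int.toNat_of_nonneg hj0
        have hdvd : i ∣ ((j.toNat : Nat) : Int) + 1 :=
          ((pvMem_round i n hi j.toNat).mp (by rwa [hjj])).2
        refine ⟨max 0 (v - 1), by omega, by omega, ?_⟩
        rw [hL1def]
        unfold pvMap
        rw [List.getElem?_mapIdx, hvL, Option.map_some, if_pos hdvd, pvRound v hv0 hv9]
      have hval1 : L1[(i - 1).toNat]? = some (PySem.Int.toStr (cN : Int)) := by
        have hii : (((i-1).toNat : Nat) : Int) = i - 1 := Int.toNat_of_nonneg (by omega)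
        have hdvd : i ∣ (((i-1).toNat : Nat) : Int) + 1 := by rw [hii]; exact ⟨1, by ring⟩
        rw [hL1def]
        unfold pvMap
        rw [List.getElem?_mapIdx, hval, Option.map_some]
        simp only [if_pos hdvd, hr1]
        congr 2
        push_cast
        omega
      rw [ih f L1 (h ++ [i]) true (by omega) (by omega) hL1 hcanon1 hval1]
      -- assemble
      have hrep : (h ++ [i]) ++ List.replicate cN i = h ++ List.replicate (cN + 1) i := by
        rw [List.append_assoc, List.replicate_succ, List.singleton_append]
      by_cases hc0 : cN = 0
      · subst hc0
        norm_num [hrep, hL1def]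
      · simp only [if_neg hc0, if_neg (by omega : ¬ cN + 1 = 0), hrep]
        refine Prod.ext ?_ (Prod.ext rfl rfl)
        show pvMap i (fun v => max 0 (v - (cN : Int))) L1
            = pvMap i (fun v => max 0 (v - ((cN + 1 : Nat) : Int))) L
        have hcast : ((cN + 1 : Nat) : Int) = (cN : Int) + 1 := by push_cast; ring
        rw [hcast, hL1def, pvMapComp n i hi (cN : Int) (by omega) L hL hcanon]

-- if the divisor-zero clause of pvGI holds, the value read in a divisor round i is 0
lemma pvDivZero (nN : Nat) (i : Int) (hi : 1 ≤ i) (hin : i < (nN : Int)) (L : List String)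
    (hz : ∀ k : Nat, 1 ≤ k → k < nN → k ∣ nN → L[k - 1]? = some (PySem.Int.toStr 0))
    (hdvd : i ∣ (nN : Int)) (c : Int) (hc0 : 0 ≤ c) (hc9 : c ≤ 9)
    (hval : L[(i - 1).toNat]? = some (PySem.Int.toStr c)) : c = 0 := by
  have hii : ((i.toNat : Nat) : Int) = i := Int.toNat_of_nonneg (by omega)
  have hdN : i.toNat ∣ nN := by
    rw [← Int.natCast_dvd_natCast, hii]
    exact hdvd
  have h0 := hz i.toNat (by omega) (by omega) hdN
  have hidx : i.toNat - 1 = (i - 1).toNat := by omega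
  rw [hidx, hval] at h0
  have := Option.some_inj.mp h0
  interval_cases c <;> revert this <;> decide

-- one round: A's while loop computes exactly B's round step (plus some flag), preserving pvGI
lemma pvRoundStep (nN : Nat) (i : Int) (hi : 1 ≤ i) (hin : i < (nN : Int))
    (L : List String) (h : List Int) (fl : Bool) (hGI : pvGI nN L) :
    ∃ fl' : Bool,
      countHorsesWhile (nN : Int) i 10 (L, h, fl) =
        ((pvBStep (nN : Int) (L, h) i).1, (pvBStep (nN : Int) (L, h) i).2, fl') ∧
      pvGI nN (pvBStep (nN : Int) (L, h) i).1 := by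
  obtain ⟨hlen, hcan, hlast⟩ := hGI
  have hnN2 : 2 ≤ nN := by omega
  have hpN : (i - 1).toNat + 1 < nN := by omega
  obtain ⟨c, hc0, hc9, hval⟩ := hcan (i - 1).toNat hpN
  have hparse : (PySem.List.pyGet? L (i - 1)).bind PySem.Int.ofStr? = some c := by
    rw [pvGet_nonneg L (i - 1) (by omega), hval]
    simp [pvRound c hc0 hc9]
  by_cases hcpos : 0 < c
  · -- the while loop runs c sweeps; B does one closed-form sweep
    have hcanonJ : pvCanonJ (nN : Int) i L := by
      intro j hj
      obtain ⟨hj0, hjlt⟩ := pvRange_bounds (i-1) (nN : Int) i (by omega) (by omega) j hj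
      by_cases hping : j.toNat + 1 < nN
      · exact hcan j.toNat hping
      · have hjlast : j.toNat = nN - 1 := by omega
        have hjj : ((j.toNat : Nat) : Int) = j := Int.toNat_of_nonneg hj0
        have hdvd : i ∣ (nN : Int) := by
          have := ((pvMem_round i (nN : Int) hi j.toNat).mp (by rwa [hjj])).2
          have hcast : ((j.toNat : Nat) : Int) + 1 = (nN : Int) := by
            rw [hjj]; omega
          rwa [hcast] at this
        rcases hlast with hcl | hz
        · rwa [hjlast]
        · exact absurd (pvDivZero nN i hi hin L hz hdvd c hc0 hc9 hval) (by omega)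
    have hcT : c.toNat ≠ 0 := by omega
    have hcc : ((c.toNat : Nat) : Int) = c := Int.toNat_of_nonneg hc0
    have hLn' : ((L.length : Nat) : Int) = (nN : Int) := by rw [hlen]
    have hvalT : L[(i - 1).toNat]? = some (PySem.Int.toStr ((c.toNat : Nat) : Int)) := by
      rw [hcc]; exact hval
    have hwhile := pvWhileA_eq (nN : Int) i hi hin c.toNat 10 L h fl (by omega) (by omega)
      hLn' hcanonJ hvalT
    rw [if_neg hcT, if_neg hcT] at hwhile
    have hB : pvBStep (nN : Int) (L, h) i
        = (pvMap i (fun v => max 0 (v - c)) L, h ++ List.replicate c.toNat i) := by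
      show (match (PySem.List.pyGet? L (i - 1)).bind PySem.Int.ofStr? with
            | none => (L, h)
            | some c =>
              if 0 < c then
                ((PySem.List.pyRange (i - 1) (nN : Int) i).foldl
                  (pvStepF (fun v => max 0 (v - c))) L,
                 h ++ List.replicate c.toNat i)
              else (L, h)) = _
      rw [hparse]
      simp only [if_pos hcpos]
      rw [pvInnerF_eq (nN : Int) i _ hi L (by rw [hlen])]
    refine ⟨true, ?_, ?_⟩
    · rw [hwhile, hB, hcc]
    · rw [hB]
      refine ⟨by rw [pvMap_length]; exact hlen, ?_, ?_⟩
      · intro p hp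
        obtain ⟨v, hv0, hv9, hvL⟩ := hcan p hp
        by_cases hdvd : i ∣ (p : Int) + 1
        · refine ⟨max 0 (v - c), by omega, by omega, ?_⟩
          show (pvMap i (fun v => max 0 (v - c)) L)[p]? = _
          unfold pvMap
          rw [List.getElem?_mapIdx, hvL, Option.map_some, if_pos hdvd, pvRound v hv0 hv9]
        · refine ⟨v, hv0, hv9, ?_⟩
          show (pvMap i (fun v => max 0 (v - c)) L)[p]? = _
          unfold pvMap
          rw [List.getElem?_mapIdx, hvL, Option.map_some, if_neg hdvd]
      · rcases hlast with hcl | hz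
        · left
          obtain ⟨v, hv0, hv9, hvL⟩ := hcl
          by_cases hdvd : i ∣ ((nN - 1 : Nat) : Int) + 1
          · refine ⟨max 0 (v - c), by omega, by omega, ?_⟩
            show (pvMap i (fun v => max 0 (v - c)) L)[nN - 1]? = _
            unfold pvMap
            rw [List.getElem?_mapIdx, hvL, Option.map_some, if_pos hdvd, pvRound v hv0 hv9]
          · refine ⟨v, hv0, hv9, ?_⟩
            show (pvMap i (fun v => max 0 (v - c)) L)[nN - 1]? = _
            unfold pvMap
            rw [List.getElem?_mapIdx, hvL, Option.map_some, if_neg hdvd]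
        · right
          intro k hk1 hk2 hkd
          have h0 := hz k hk1 hk2 hkd
          have hnd : ¬ i ∣ ((k - 1 : Nat) : Int) + 1 := by
            intro hik
            have hcast : ((k - 1 : Nat) : Int) + 1 = (k : Int) := by push_cast [hk1]; omega
            rw [hcast] at hik
            have : i ∣ (nN : Int) := dvd_trans hik (Int.natCast_dvd_natCast.mpr hkd)
            exact absurd (pvDivZero nN i hi hin L hz this c hc0 hc9 hval) (by omega)
          show (pvMap i (fun v => max 0 (v - c)) L)[k - 1]? = _
          unfold pvMap
          rw [List.getElem?_mapIdx, h0, Option.map_some, if_neg hnd]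
  · -- c = 0: the while loop exits at once and B skips the round
    have hc0' : c = 0 := by omega
    have hA : countHorsesWhile (nN : Int) i 10 (L, h, fl) = (L, h, fl) := by
      show (match (PySem.List.pyGet? L (i-1)).bind PySem.Int.ofStr? with
            | none => (L, h, fl)
            | some v => if 0 < v then
                countHorsesWhile (nN : Int) i 9 (countHorsesPass (nN : Int) i (L, h, fl))
              else (L, h, fl)) = _
      rw [hparse]
      simp [hcpos]
    have hB : pvBStep (nN : Int) (L, h) i = (L, h) := by
      show (match (PySem.List.pyGet? L (i - 1)).bind PySem.Int.ofStr? with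
            | none => (L, h)
            | some c =>
              if 0 < c then
                ((PySem.List.pyRange (i - 1) (nN : Int) i).foldl
                  (pvStepF (fun v => max 0 (v - c))) L,
                 h ++ List.replicate c.toNat i)
              else (L, h)) = _
      rw [hparse]
      simp [hcpos]
    exact ⟨fl, by rw [hA, hB], by rw [hB]; exact ⟨hlen, hcan, hlast⟩⟩

-- the outer loops agree, projected to (list_s, horse)
lemma pvOuter_eq (nN : Nat) (R : List Int) (hR : ∀ i ∈ R, 1 ≤ i ∧ i < (nN : Int)) :
    ∀ (L : List String) (h : List Int) (fl : Bool), pvGI nN L →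
      ((R.foldl (fun st i => countHorsesWhile (nN : Int) i 10 st) (L, h, fl)).2.1
        = (R.foldl (pvBStep (nN : Int)) (L, h)).2) := by
  induction R with
  | nil => intro L h fl _; rfl
  | cons i T ih =>
    intro L h fl hGI
    obtain ⟨hi, hin⟩ := hR i (List.mem_cons_self)
    obtain ⟨fl', hstep, hGI'⟩ := pvRoundStep nN i hi hin L h fl hGI
    rw [List.foldl_cons, List.foldl_cons, hstep]
    exact ih (fun t ht => hR t (List.mem_cons_of_mem i ht)) _ _ fl' hGI'

-- ===== VERDICT (by name: the statement is the Claim_ definition above) =====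
theorem count_horses_spec : Claim_equal_count_horses := by
  intro s _ hPre
  unfold Spec_count_horses count_horses count_horses_alt
  unfold Pre_count_horses at hPre
  simp only []
  generalize hcs : s.toList = cs at hPre ⊢
  set L0 : List String := cs.map (fun ch => String.ofList [ch]) with hL0
  have hlen : L0.length = cs.length := by rw [hL0, List.length_map]
  have hpe : ∀ (p : Nat) (hp : p < cs.length), L0[p]? = some (String.ofList [cs[p]]) := by
    intro p hp
    rw [hL0, List.getElem?_map, List.getElem?_eq_getElem hp]
    rfl
  have hGI : pvGI cs.length L0 := by
    by_cases hsmall : cs.length ≤ 1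
    · refine ⟨hlen, fun p hp => by omega, Or.inr fun k hk1 hk2 _ => by omega⟩
    · rcases hPre with h1 | ⟨hdig, hlast⟩
      · exact absurd h1 hsmall
      · refine ⟨hlen, ?_, ?_⟩
        · intro p hp
          obtain ⟨v, hv0, hv9, hv⟩ := pvDigit cs[p]
            (by rw [← getElem!_pos cs p (by omega)]; exact hdig p (by omega))
          exact ⟨v, hv0, hv9, by rw [hpe p (by omega), hv]⟩
        · rcases hlast with hd | hz
          · left
            obtain ⟨v, hv0, hv9, hv⟩ := pvDigit cs[cs.length - 1]
              (by rw [← getElem!_pos cs (cs.length - 1) (by omega)]; exact hd)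
            exact ⟨v, hv0, hv9, by rw [hpe (cs.length - 1) (by omega), hv]⟩
          · right
            intro k hk1 hk2 hkd
            have h0 := hz k hk1 hk2 hkd
            rw [getElem!_pos cs (k - 1) (by omega)] at h0
            rw [hpe (k - 1) (by omega), h0]
            rfl
  have hR : ∀ j ∈ PySem.List.pyRange 1 (cs.length : Int) 1, 1 ≤ j ∧ j < (cs.length : Int) := by
    intro j hj
    obtain ⟨h1, h2, _⟩ := (PySem.List.mem_pyRange_iff_of_pos (by omega) j).mp hj
    exact ⟨h1, h2⟩
  have hLn : ((cs.map (fun ch => String.ofList [ch])).length : Int) = (cs.length : Int) := by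
    rw [← hL0, hlen]
  rw [hLn]
  exact pvOuter_eq cs.length _ hR L0 [] false hGI
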